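-- pv_equiv track=rewrite | github.com/DOI-BOR/American-WTMP-Scripts | OutputLink_W2_Folsom-DownstreamAmer.py | merge_data_nearest_jday
-- ===== SOURCE A (Python) =====
-- def merge_data_nearest_jday(jday1, jday2, data2, jd1_offset=0):
--     """
--     Merges the data from datasets (jday2, data2) to jday1 based on the nearest jday.
--
--     Args:
--         jday1: List of jday values for the first dataset.
--         jday2: List of jday values for the second dataset.
--         data2: List of corresponding data values for the second dataset.
--         jd1_offset: offset in days. Sometimes timezones are a terrible thing
--
--     Returns:
--         data2_jday1: merged data2 of len(jday1)
--     """
--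
--     data2_jday1 = []
--     for i, jday1_val in enumerate(jday1):
--         min_diff = 1.0e9  # Initialize with positive infinity
--         nearest_jday2_val = None
--         corresponding_T2_val = None
--
--         for j, jday2_val in enumerate(jday2):
--             diff = abs(jday1_val+jd1_offset - jday2_val)
--             if diff < min_diff:
--                 min_diff = diff
--                 nearest_jday2_val = jday2_val
--                 corresponding_data2_val = data2[j]
--
--         data2_jday1.append(corresponding_data2_val)
--
--     return data2_jday1
-- ===== SOURCE B (Python) =====
-- def merge_data_nearest_jday(jday1, jday2, data2, jd1_offset=0):
--     """Sort the distinct jday2 values once (remembering the first index of each),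
--     then answer every jday1 query by binary search over the sorted values,
--     breaking distance ties toward the value with the smaller original index."""
--     first = {}  # value -> first index in jday2
--     for j, v in enumerate(jday2):
--         if v not in first:
--             first[v] = j
--     vals = sorted(first)
--     out = []
--     for x in jday1:
--         t = x + jd1_offset
--         lo, hi = 0, len(vals)
--         while lo < hi:
--             mid = (lo + hi) // 2
--             if vals[mid] < t:
--                 lo = mid + 1
--             else:
--                 hi = mid
--         if lo == len(vals):
--             v = vals[-1]
--         elif lo == 0:
--             v = vals[0]
--         else:
--             a, b = vals[lo - 1], vals[lo]
--             if t - a < b - t: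
--                 v = a
--             elif b - t < t - a:
--                 v = b
--             else:
--                 v = a if first[a] < first[b] else b
--         out.append(data2[first[v]])
--     return out
-- ===== Notes on version B (the rewrite author's own statement) =====
-- stated objective: faster
-- what changed: Instead of a full linear scan of jday2 per jday1 query, B builds a first-occurrence-index dict and a sorted list of the distinct jday2 values once, then answers each query by binary search and a two-neighbour comparison (ties broken toward the smaller original index), dropping the inner scan entirely.
-- outside the precondition, e.g. on merge_data_nearest_jday([2], [2, 3], [5], 0): A returns [5], B returns [5]; on merge_data_nearest_jday([-2000000000, 2147483647], [0, -2000000000], [1, 2], 0): A returns [2, 2], B returns [2, 1]; on merge_data_nearest_jday([2000000000], [1], [7], 0): A raises UnboundLocalError, B returns [7]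
import Mathlib
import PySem

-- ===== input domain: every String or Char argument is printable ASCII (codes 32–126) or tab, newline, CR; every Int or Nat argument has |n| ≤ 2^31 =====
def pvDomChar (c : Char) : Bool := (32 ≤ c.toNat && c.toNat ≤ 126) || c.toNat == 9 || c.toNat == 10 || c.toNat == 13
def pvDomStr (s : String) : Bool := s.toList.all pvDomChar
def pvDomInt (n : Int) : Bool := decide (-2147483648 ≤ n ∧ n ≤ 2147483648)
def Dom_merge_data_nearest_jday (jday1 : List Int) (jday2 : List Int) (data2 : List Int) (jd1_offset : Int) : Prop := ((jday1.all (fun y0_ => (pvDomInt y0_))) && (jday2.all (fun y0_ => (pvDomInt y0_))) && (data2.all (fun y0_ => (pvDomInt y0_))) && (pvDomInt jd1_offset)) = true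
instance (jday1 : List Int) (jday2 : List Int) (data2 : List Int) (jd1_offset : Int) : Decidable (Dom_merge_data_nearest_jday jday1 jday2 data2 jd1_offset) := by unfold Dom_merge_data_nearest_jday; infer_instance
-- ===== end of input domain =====

-- B replaces A's per-query linear scan of jday2 by one sorted index of the distinct jday2
-- values plus a binary search per query (measured faster in a timing run); queries beyond
-- A's 1.0e9 sentinel are excluded by Pre_ (see its comment).

-- ===== PORT A =====
-- A's min_diff starts as the float 1.0e9; all compared diffs are ints, and int-float
-- comparison at these magnitudes is exact in Python, so it is modelled as the integer 10^9.
-- The inner state is (min_diff, corresponding_data2_val); `none` models the variable being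
-- unbound (Python's UnboundLocalError on append, excluded by Pre_), and pyGet? data2 j = none
-- models the IndexError on data2[j] (also excluded by Pre_); `.getD 0` stands for those raises.
-- The unused variable nearest_jday2_val is not modelled.
def merge_data_nearest_jday (jday1 : List Int) (jday2 : List Int) (data2 : List Int) (jd1_offset : Int) : List Int :=
  (jday1.foldl
    (fun (acc : List Int × Option Int) x =>
      let inner :=
        (PySem.List.enumerate jday2 0).foldl
          (fun (st : Int × Option Int) jv =>
            if |x + jd1_offset - jv.2| < st.1 then
              (|x + jd1_offset - jv.2|, PySem.List.pyGet? data2 jv.1)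
            else st)
          ((1000000000 : Int), acc.2)
      (acc.1 ++ [inner.2.getD 0], inner.2))
    (([] : List Int), (none : Option Int))).1

-- ===== PORT B =====
-- first = {}; for j, v in enumerate(jday2): if v not in first: first[v] = j
def pvFirstIdx (jday2 : List Int) : PySem.Dict Int Int :=
  (PySem.List.enumerate jday2 0).foldl
    (fun d jv => if d.contains jv.2 then d else d.insert jv.2 jv.1)
    PySem.Dict.empty

-- the hand-written bisect_left loop of Source B: while lo < hi: mid=(lo+hi)//2; ...
-- vals[mid] is always in range when the loop runs (0 ≤ lo ≤ mid < hi ≤ len vals), so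
-- `getD mid 0` is exact there.
-- (structural recursion on the fuel `hi - lo`, which bounds the number of iterations,
-- so that the definition is kernel-reducible; the loop body is unchanged)
def pvBsearchAux (vals : List Int) (t : Int) : Nat → Nat → Nat → Nat
  | 0, lo, _ => lo
  | fuel + 1, lo, hi =>
    if lo < hi then
      let mid := (lo + hi) / 2
      if vals.getD mid 0 < t then pvBsearchAux vals t fuel (mid + 1) hi
      else pvBsearchAux vals t fuel lo mid
    else lo

def pvBsearch (vals : List Int) (t : Int) (lo hi : Nat) : Nat :=
  pvBsearchAux vals t (hi - lo) lo hi

-- vals[-1] on an empty vals raises IndexError in Python (excluded by Pre_);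
-- `getD (len-1) 0` stands for that raise. first[a]/first[b]/first[v] are always present keys,
-- and data2[first[v]] is modelled with pyGet? exactly as in port A.
def merge_data_nearest_jday_alt (jday1 : List Int) (jday2 : List Int) (data2 : List Int) (jd1_offset : Int) : List Int :=
  let first := pvFirstIdx jday2
  let vals := PySem.List.sorted first.keys (fun v => v) false
  jday1.foldl
    (fun out x =>
      let t := x + jd1_offset
      let lo := pvBsearch vals t 0 vals.length
      let v :=
        if lo = vals.length then vals.getD (vals.length - 1) 0
        else if lo = 0 then vals.getD 0 0
        else
          let a := vals.getD (lo - 1) 0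
          let b := vals.getD lo 0
          if t - a < b - t then a
          else if b - t < t - a then b
          else if first.getD a 0 < first.getD b 0 then a else b
      out ++ [(PySem.List.pyGet? data2 (first.getD v 0)).getD 0])
    ([] : List Int)

-- ===== PRECONDITION & SPEC =====
-- Pre_ excludes (i) data2 shorter than jday2 (the lists are meant to be parallel; A can raise
-- IndexError on data2[j], and where it happens to return, B returns the same value — see the
-- cites), and (ii) queries with no jday2 value within 10^9: beyond A's 1.0e9 pseudo-infinity
-- initializer the scan never updates, so A raises UnboundLocalError when the first query is
-- such (in particular when jday2 is empty and jday1 is not) and returns a leftover value from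
-- the previous query for later ones — a sentinel artefact on inputs far outside the julian-day
-- scale this function is written for, where B returns the data of the truly nearest jday2 value.
def Pre_merge_data_nearest_jday (jday1 : List Int) (jday2 : List Int) (data2 : List Int) (jd1_offset : Int) : Prop :=
  jday2.length ≤ data2.length ∧
  ∀ x ∈ jday1, ∃ y ∈ jday2, |x + jd1_offset - y| < 1000000000
instance (jday1 : List Int) (jday2 : List Int) (data2 : List Int) (jd1_offset : Int) : Decidable (Pre_merge_data_nearest_jday jday1 jday2 data2 jd1_offset) := by unfold Pre_merge_data_nearest_jday; infer_instance

def pvWitness_merge_data_nearest_jday : List Int × List Int × List Int × Int := ([0], [1], [7], 0)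

def Spec_merge_data_nearest_jday (jday1 : List Int) (jday2 : List Int) (data2 : List Int) (jd1_offset : Int) (out : List Int) : Prop := out = merge_data_nearest_jday_alt jday1 jday2 data2 jd1_offset
instance (jday1 : List Int) (jday2 : List Int) (data2 : List Int) (jd1_offset : Int) (out : List Int) : Decidable (Spec_merge_data_nearest_jday jday1 jday2 data2 jd1_offset out) := by unfold Spec_merge_data_nearest_jday; infer_instance

-- ===== CLAIM (what is proved, stated in full; the proofs are below) =====
def Claim_equal_merge_data_nearest_jday : Prop := ∀ (jday1 : List Int) (jday2 : List Int) (data2 : List Int) (jd1_offset : Int), Dom_merge_data_nearest_jday jday1 jday2 data2 jd1_offset → Pre_merge_data_nearest_jday jday1 jday2 data2 jd1_offset → Spec_merge_data_nearest_jday jday1 jday2 data2 jd1_offset (merge_data_nearest_jday jday1 jday2 data2 jd1_offset)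

-- ===== LEMMAS AND PROOFS =====

-- ---- A-side characterisation: the inner scan selects the first index of minimal distance ----

theorem pvGetD_mem {α : Type} (l : List α) (k : Nat) (d : α) (h : k < l.length) :
    l.getD k d ∈ l := by
  rw [List.getD_eq_getElem l d h]
  exact List.getElem_mem h

-- `pvSel t l md = some k` ⟺ the inner loop, entered with current best distance `md`,
-- ends with `corresponding_data2_val` pointing at (relative) index k of l.
def pvSel (t : Int) : List Int → Int → Option Nat
  | [], _ => none
  | v :: r, md =>
    if |t - v| < md then
      some (match pvSel t r |t - v| with | none => 0 | some k => k + 1)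
    else (pvSel t r md).map (· + 1)

def pvMinMd (t : Int) (l : List Int) (md : Int) : Int :=
  l.foldl (fun m v => if |t - v| < m then |t - v| else m) md

theorem pvFoldA_eq (t : Int) (data2 : List Int) :
    ∀ (l : List Int) (s : Int) (md : Int) (c : Option Int),
    (PySem.List.enumerate l s).foldl
      (fun (st : Int × Option Int) jv =>
        if |t - jv.2| < st.1 then (|t - jv.2|, PySem.List.pyGet? data2 jv.1) else st)
      (md, c)
    = (pvMinMd t l md,
       match pvSel t l md with
       | none => c
       | some k => PySem.List.pyGet? data2 (s + (k : Int))) := by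
  intro l
  induction l with
  | nil => intro s md c; simp [pvMinMd, pvSel, PySem.List.enumerate_nil]
  | cons v r ih =>
    intro s md c
    rw [PySem.List.enumerate_cons]
    simp only [List.foldl_cons]
    by_cases h : |t - v| < md
    · simp only [h, if_pos]
      rw [ih (s + 1) |t - v| (PySem.List.pyGet? data2 s)]
      simp only [pvSel, pvMinMd, List.foldl_cons, h, if_pos]
      cases hsel : pvSel t r |t - v| with
      | none => simp [hsel]
      | some k =>
        simp only [hsel]
        norm_num
        congr 1
        push_cast
        ring
    · simp only [h, if_neg, if_false]
      rw [ih (s + 1) md c]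
      simp only [pvSel, pvMinMd, List.foldl_cons, h, if_neg, if_false]
      cases hsel : pvSel t r md with
      | none => simp [hsel]
      | some k =>
        simp only [hsel, Option.map_some]
        congr 1
        push_cast
        ring

theorem pvSel_eq_none_iff (t : Int) : ∀ (l : List Int) (md : Int),
    pvSel t l md = none ↔ ∀ v ∈ l, md ≤ |t - v| := by
  intro l
  induction l with
  | nil => intro md; simp [pvSel]
  | cons v r ih =>
    intro md
    simp only [pvSel]
    by_cases h : |t - v| < md
    · simp only [h, if_pos]
      constructor
      · intro hc; exact absurd hc (by simp)
      · intro hall; exact absurd (hall v (by simp)) (by omega)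
    · simp only [h, if_neg, if_false, Option.map_eq_none_iff, ih]
      constructor
      · intro hall w hw
        rcases List.mem_cons.mp hw with rfl | hw
        · omega
        · exact hall w hw
      · intro hall w hw; exact hall w (List.mem_cons_of_mem _ hw)

theorem pvSel_some_spec (t : Int) : ∀ (l : List Int) (md : Int) (k : Nat),
    pvSel t l md = some k →
    k < l.length ∧ |t - l.getD k 0| < md ∧
      ∀ i < l.length,
        |t - l.getD k 0| ≤ |t - l.getD i 0| ∧
        (i < k → |t - l.getD k 0| < |t - l.getD i 0|) := by
  intro l
  induction l with
  | nil => intro md k h; simp [pvSel] at h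
  | cons v r ih =>
    intro md k h
    simp only [pvSel] at h
    by_cases hv : |t - v| < md
    · simp only [hv, if_pos, Option.some.injEq] at h
      cases hsel : pvSel t r |t - v| with
      | none =>
        rw [hsel] at h
        subst h
        have hall := (pvSel_eq_none_iff t r |t - v|).mp hsel
        refine ⟨by simp, by simpa using hv, ?_⟩
        intro i hi
        refine ⟨?_, by intro hc; exact absurd hc (Nat.not_lt_zero i)⟩
        match i with
        | 0 => simp
        | Nat.succ j =>
          simp only [List.getD_cons_zero, List.getD_cons_succ]
          exact hall _ (pvGetD_mem r j 0 (by simpa using hi))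
      | some k' =>
        rw [hsel] at h
        subst h
        obtain ⟨hk', hlt, hmin⟩ := ih |t - v| k' hsel
        refine ⟨by simpa using hk', by simp only [List.getD_cons_succ]; omega, ?_⟩
        intro i hi
        match i with
        | 0 =>
          simp only [List.getD_cons_succ, List.getD_cons_zero]
          omega
        | Nat.succ j =>
          simp only [List.getD_cons_succ]
          have := hmin j (by simpa using hi)
          exact ⟨this.1, fun hj => this.2 (by omega)⟩
    · simp only [hv, if_neg, if_false, Option.map_eq_some_iff] at h
      obtain ⟨k', hsel, rfl⟩ := h
      obtain ⟨hk', hlt, hmin⟩ := ih md k' hsel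
      refine ⟨by simpa using hk', by simpa using hlt, ?_⟩
      intro i hi
      match i with
      | 0 =>
        simp only [List.getD_cons_succ, List.getD_cons_zero]
        omega
      | Nat.succ j =>
        simp only [List.getD_cons_succ]
        have := hmin j (by simpa using hi)
        exact ⟨this.1, fun hj => this.2 (by omega)⟩

-- `k` is the first index of `l` at minimal distance from `t`
def pvIsFirstMin (t : Int) (l : List Int) (k : Nat) : Prop :=
  k < l.length ∧
  ∀ i < l.length,
    |t - l.getD k 0| ≤ |t - l.getD i 0| ∧
    (i < k → |t - l.getD k 0| < |t - l.getD i 0|)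

theorem pvIsFirstMin_unique {t : Int} {l : List Int} {j k : Nat}
    (hj : pvIsFirstMin t l j) (hk : pvIsFirstMin t l k) : j = k := by
  rcases Nat.lt_trichotomy j k with h | h | h
  · have h1 := (hk.2 j hj.1).2 h
    have h2 := (hj.2 k hk.1).1
    omega
  · exact h
  · have h1 := (hj.2 k hk.1).2 h
    have h2 := (hk.2 j hj.1).1
    omega

-- ---- B-side: the first-occurrence dict ----

def pvIdxInt (l : List Int) (v : Int) : Option Int :=
  (PySem.List.index? l v).map (fun n : Nat => (n : Int))

theorem pvFirstIdx_fold (v : Int) : ∀ (l : List Int) (s : Int) (d : PySem.Dict Int Int),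
    ((PySem.List.enumerate l s).foldl
        (fun d (jv : Int × Int) => if d.contains jv.2 then d else d.insert jv.2 jv.1) d).get? v
    = if d.contains v then d.get? v
      else (pvIdxInt l v).map (fun m => s + m) := by
  intro l
  induction l with
  | nil =>
    intro s d
    simp only [PySem.List.enumerate_nil, List.foldl_nil, pvIdxInt, PySem.List.index?,
      List.idxOf?_nil, Option.map_none]
    by_cases hc : d.contains v
    · simp [hc]
    · simp [hc, PySem.Dict.get?_eq_none_iff_not_mem_keys,
        (PySem.Dict.contains_iff_mem_keys d v).symm, hc]
  | cons w r ih =>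
    intro s d
    rw [PySem.List.enumerate_cons]
    simp only [List.foldl_cons]
    by_cases hc : d.contains w
    · simp only [hc, if_pos, if_true]
      rw [ih (s + 1) d]
      by_cases hv : v = w
      · subst hv; simp [hc]
      · simp only [pvIdxInt]
        rw [PySem.List.index?_cons_of_ne r (fun h => hv h.symm)]
        by_cases hcv : d.contains v
        · simp [hcv]
        · simp only [hcv, if_false, Option.map_map, pvIdxInt, Bool.false_eq_true]
          cases PySem.List.index? r v with
          | none => simp
          | some n =>
            simp only [Option.map_some, Function.comp, Option.some.injEq]
            push_cast; ring
    · simp only [hc, if_neg, if_false, Bool.false_eq_true]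
      rw [ih (s + 1) (d.insert w s)]
      by_cases hv : v = w
      · subst hv
        simp only [PySem.Dict.contains_insert, BEq.rfl, Bool.true_or, if_true,
          PySem.Dict.get?_insert_self, pvIdxInt, PySem.List.index?_cons_self, Option.map_some]
        simp
        intro h'
        exact absurd h' hc
      · simp only [pvIdxInt]
        rw [PySem.Dict.contains_insert, PySem.List.index?_cons_of_ne r (fun h => hv h.symm)]
        have hbeq : (v == w) = false := by simp [hv]
        rw [hbeq, Bool.false_or]
        by_cases hcv : d.contains v
        · simp [hcv, PySem.Dict.get?_insert_of_ne d s hv]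
        · simp only [hcv, if_false, Option.map_map, pvIdxInt, Bool.false_eq_true]
          cases PySem.List.index? r v with
          | none => simp
          | some n =>
            simp only [Option.map_some, Function.comp, Option.some.injEq]
            push_cast; ring

theorem get?_pvFirstIdx (jday2 : List Int) (v : Int) :
    (pvFirstIdx jday2).get? v = pvIdxInt jday2 v := by
  unfold pvFirstIdx
  rw [pvFirstIdx_fold v jday2 0 PySem.Dict.empty]
  simp only [PySem.Dict.contains_empty, Bool.false_eq_true, if_false]
  cases h : pvIdxInt jday2 v <;> simp

theorem pvNodup_fold : ∀ (l : List (Int × Int)) (d : PySem.Dict Int Int), d.keys.Nodup →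
    (l.foldl (fun d (jv : Int × Int) => if d.contains jv.2 then d else d.insert jv.2 jv.1) d).keys.Nodup := by
  intro l
  induction l with
  | nil => intro d hd; simpa using hd
  | cons p r ih =>
    intro d hd
    simp only [List.foldl_cons]
    apply ih
    by_cases hc : d.contains p.2
    · simpa [hc] using hd
    · simpa [hc] using PySem.Dict.nodup_keys_insert d p.2 p.1 hd

theorem nodup_keys_pvFirstIdx (jday2 : List Int) : (pvFirstIdx jday2).keys.Nodup :=
  pvNodup_fold (PySem.List.enumerate jday2 0) PySem.Dict.empty PySem.Dict.nodup_keys_empty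

-- ---- B-side: the sorted distinct values ----

def pvVals (jday2 : List Int) : List Int :=
  PySem.List.sorted (pvFirstIdx jday2).keys (fun v => v) false

theorem mem_pvVals (jday2 : List Int) (v : Int) : v ∈ pvVals jday2 ↔ v ∈ jday2 := by
  rw [pvVals, PySem.List.mem_sorted, ← PySem.Dict.contains_iff_mem_keys]
  rw [PySem.Dict.contains_eq_isSome_get?, get?_pvFirstIdx, pvIdxInt, Option.isSome_map]
  exact PySem.List.index?_isSome_iff jday2 v

theorem pairwise_lt_pvVals (jday2 : List Int) : (pvVals jday2).Pairwise (· < ·) := by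
  have hle : (pvVals jday2).Pairwise (fun a b => a ≤ b) :=
    PySem.List.sorted_pairwise (pvFirstIdx jday2).keys (fun v => v)
  have hnd : (pvVals jday2).Nodup :=
    ((PySem.List.sorted_perm (pvFirstIdx jday2).keys (fun v => v) false).nodup_iff).mpr
      (nodup_keys_pvFirstIdx jday2)
  exact (hle.and hnd).imp (fun h => lt_of_le_of_ne h.1 h.2)

theorem pvVals_mono (jday2 : List Int) {i j : Nat} (hij : i < j) (hj : j < (pvVals jday2).length) :
    (pvVals jday2).getD i 0 < (pvVals jday2).getD j 0 := by
  have h := List.pairwise_iff_getElem.mp (pairwise_lt_pvVals jday2) i j (by omega) hj hij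
  rwa [List.getD_eq_getElem _ 0 (by omega), List.getD_eq_getElem _ 0 hj]

-- ---- B-side: the binary-search loop finds the partition point ----

theorem pvBsearchAux_spec (vals : List Int) (t : Int)
    (hmono : ∀ i j : Nat, i < j → j < vals.length → vals.getD i 0 ≤ vals.getD j 0) :
    ∀ (fuel lo hi : Nat), hi ≤ vals.length → lo ≤ hi → hi - lo ≤ fuel →
    (∀ k < lo, vals.getD k 0 < t) →
    (∀ k : Nat, hi ≤ k → k < vals.length → t ≤ vals.getD k 0) →
    lo ≤ pvBsearchAux vals t fuel lo hi ∧ pvBsearchAux vals t fuel lo hi ≤ hi ∧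
    (∀ k < pvBsearchAux vals t fuel lo hi, vals.getD k 0 < t) ∧
    (∀ k : Nat, pvBsearchAux vals t fuel lo hi ≤ k → k < vals.length → t ≤ vals.getD k 0) := by
  intro fuel
  induction fuel with
  | zero =>
    intro lo hi hhi hlohi hfuel hlow hhigh
    have : lo = hi := by omega
    subst this
    simp only [pvBsearchAux]
    exact ⟨le_refl _, le_refl _, hlow, hhigh⟩
  | succ fuel ih =>
    intro lo hi hhi hlohi hfuel hlow hhigh
    simp only [pvBsearchAux]
    by_cases h : lo < hi
    · simp only [h, if_pos, if_true]
      by_cases hmid : vals.getD ((lo + hi) / 2) 0 < t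
      · simp only [hmid, if_pos, if_true]
        have hres := ih ((lo + hi) / 2 + 1) hi hhi (by omega) (by omega)
          (fun k hk => by
            rcases Nat.lt_or_ge k ((lo + hi) / 2) with hk' | hk'
            · exact lt_of_le_of_lt (hmono k ((lo + hi) / 2) hk' (by omega)) hmid
            · have : k = (lo + hi) / 2 := by omega
              subst this; exact hmid)
          hhigh
        exact ⟨by omega, hres.2.1, hres.2.2.1, hres.2.2.2⟩
      · simp only [hmid, if_neg, if_false]
        have hres := ih lo ((lo + hi) / 2) (by omega) (by omega) (by omega) hlow
          (fun k hk hk' => by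
            rcases Nat.lt_or_ge ((lo + hi) / 2) k with hk'' | hk''
            · exact le_trans (by omega) (hmono ((lo + hi) / 2) k hk'' hk')
            · have : k = (lo + hi) / 2 := by omega
              subst this; omega)
        exact ⟨hres.1, le_trans hres.2.1 (by omega), hres.2.2.1, hres.2.2.2⟩
    · simp only [h, if_neg, if_false]
      have : lo = hi := by omega
      subst this
      exact ⟨le_refl _, le_refl _, hlow, hhigh⟩

theorem pvBsearch_spec (vals : List Int) (t : Int)
    (hmono : ∀ i j : Nat, i < j → j < vals.length → vals.getD i 0 ≤ vals.getD j 0) :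
    pvBsearch vals t 0 vals.length ≤ vals.length ∧
    (∀ k < pvBsearch vals t 0 vals.length, vals.getD k 0 < t) ∧
    (∀ k : Nat, pvBsearch vals t 0 vals.length ≤ k → k < vals.length → t ≤ vals.getD k 0) := by
  have h := pvBsearchAux_spec vals t hmono (vals.length - 0) 0 vals.length (le_refl _)
    (Nat.zero_le _) (le_refl _) (fun k hk => absurd hk (Nat.not_lt_zero k))
    (fun k hk hk' => absurd hk' (by omega))
  exact ⟨h.2.1, h.2.2.1, h.2.2.2⟩

-- ---- B-side: the per-query chosen value ----

-- proof-side name for the `v` computed in the body of B's loop (definitionally equal)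
def pvVhat (jday2 : List Int) (t : Int) : Int :=
  let first := pvFirstIdx jday2
  let vals := pvVals jday2
  let lo := pvBsearch vals t 0 vals.length
  if lo = vals.length then vals.getD (vals.length - 1) 0
  else if lo = 0 then vals.getD 0 0
  else
    let a := vals.getD (lo - 1) 0
    let b := vals.getD lo 0
    if t - a < b - t then a
    else if b - t < t - a then b
    else if first.getD a 0 < first.getD b 0 then a else b

theorem pvFoldlAppend {α β : Type} (f : α → β) :
    ∀ (l : List α) (acc : List β),
    l.foldl (fun out x => out ++ [f x]) acc = acc ++ l.map f := by
  intro l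
  induction l with
  | nil => intro acc; simp
  | cons x r ih => intro acc; simp [ih]

theorem pvAlt_eq_map (jday1 jday2 data2 : List Int) (jd1_offset : Int) :
    merge_data_nearest_jday_alt jday1 jday2 data2 jd1_offset
    = jday1.map (fun x =>
        (PySem.List.pyGet? data2
          ((pvFirstIdx jday2).getD (pvVhat jday2 (x + jd1_offset)) 0)).getD 0) := by
  have h : merge_data_nearest_jday_alt jday1 jday2 data2 jd1_offset
      = jday1.foldl (fun out x => out ++
          [(PySem.List.pyGet? data2
            ((pvFirstIdx jday2).getD (pvVhat jday2 (x + jd1_offset)) 0)).getD 0]) [] := rfl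
  rw [h, pvFoldlAppend]
  simp

theorem pvIdx_of_mem (jday2 : List Int) (v : Int) (h : v ∈ jday2) :
    ∃ n : Nat, PySem.List.index? jday2 v = some n ∧
      (pvFirstIdx jday2).getD v 0 = (n : Int) ∧ n < jday2.length ∧
      jday2.getD n 0 = v ∧ ∀ j < n, jday2.getD j 0 ≠ v := by
  have hs : (PySem.List.index? jday2 v).isSome = true :=
    (PySem.List.index?_isSome_iff jday2 v).mpr h
  cases hidx : PySem.List.index? jday2 v with
  | none => rw [hidx] at hs; simp at hs
  | some n =>
    obtain ⟨hn, hval, hfirst⟩ := PySem.List.getElem_of_index?_eq_some hidx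
    refine ⟨n, rfl, ?_, hn, ?_, ?_⟩
    · rw [PySem.Dict.getD_eq_get?_getD, get?_pvFirstIdx, pvIdxInt, hidx]
      simp
    · rw [List.getD_eq_getElem _ 0 hn]; exact hval
    · intro j hj hvj
      exact hfirst j (by omega) (by rwa [List.getD_eq_getElem _ 0 (by omega)] at hvj)

theorem pvIdx_le {jday2 : List Int} {v : Int} {n i : Nat}
    (hidx : PySem.List.index? jday2 v = some n)
    (hi : i < jday2.length) (hv : jday2.getD i 0 = v) : n ≤ i := by
  obtain ⟨hn, hval, hfirst⟩ := PySem.List.getElem_of_index?_eq_some hidx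
  by_contra hni
  exact hfirst i (by omega) (by rwa [List.getD_eq_getElem _ 0 hi] at hv)

-- B's chosen value points at exactly the index A's inner scan ends on
theorem pvVhat_firstIdx_eq (jday2 : List Int) (t : Int) (k : Nat)
    (hsel : pvSel t jday2 1000000000 = some k) :
    (pvFirstIdx jday2).getD (pvVhat jday2 t) 0 = (k : Int) := by
  obtain ⟨hk, _hklt, hkmin⟩ := pvSel_some_spec t jday2 1000000000 k hsel
  have hfmk : pvIsFirstMin t jday2 k := ⟨hk, hkmin⟩
  -- facts about vals
  set vals := pvVals jday2 with hvals
  have hmono : ∀ i j : Nat, i < j → j < vals.length → vals.getD i 0 < vals.getD j 0 :=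
    fun i j hij hj => pvVals_mono jday2 hij hj
  have hmono' : ∀ i j : Nat, i < j → j < vals.length → vals.getD i 0 ≤ vals.getD j 0 :=
    fun i j hij hj => le_of_lt (hmono i j hij hj)
  have hval_mem : ∀ i : Nat, i < vals.length → vals.getD i 0 ∈ jday2 :=
    fun i hi => (mem_pvVals jday2 _).mp (pvGetD_mem vals i 0 hi)
  have hL : 0 < vals.length := by
    have : jday2.getD k 0 ∈ jday2 := pvGetD_mem jday2 k 0 hk
    have : jday2.getD k 0 ∈ vals := (mem_pvVals jday2 _).mpr this
    exact List.length_pos_of_mem this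
  obtain ⟨hpLe, hlow, hhigh⟩ := pvBsearch_spec vals t hmono'
  set p := pvBsearch vals t 0 vals.length with hp
  -- the chosen value, its membership, minimality and tie-breaking property
  have hmain : ∃ q : Nat, q < vals.length ∧ pvVhat jday2 t = vals.getD q 0 ∧
      (∀ i : Nat, i < vals.length → |t - vals.getD q 0| ≤ |t - vals.getD i 0|) ∧
      (∀ i : Nat, i < vals.length → |t - vals.getD i 0| = |t - vals.getD q 0| →
        vals.getD i 0 ≠ vals.getD q 0 →
        (pvFirstIdx jday2).getD (vals.getD q 0) 0 < (pvFirstIdx jday2).getD (vals.getD i 0) 0) := by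
    have hvhat : pvVhat jday2 t
        = (if p = vals.length then vals.getD (vals.length - 1) 0
           else if p = 0 then vals.getD 0 0
           else
             if t - vals.getD (p - 1) 0 < vals.getD p 0 - t then vals.getD (p - 1) 0
             else if vals.getD p 0 - t < t - vals.getD (p - 1) 0 then vals.getD p 0
             else if (pvFirstIdx jday2).getD (vals.getD (p - 1) 0) 0 <
                 (pvFirstIdx jday2).getD (vals.getD p 0) 0 then vals.getD (p - 1) 0
             else vals.getD p 0) := rfl
    rw [hvhat]
    by_cases hplen : p = vals.length
    · rw [if_pos hplen]
      refine ⟨vals.length - 1, by omega, rfl, ?_, ?_⟩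
      · intro i hi
        have hwi : vals.getD i 0 < t := hlow i (by omega)
        have hwq : vals.getD (vals.length - 1) 0 < t := hlow _ (by omega)
        have hle : vals.getD i 0 ≤ vals.getD (vals.length - 1) 0 := by
          rcases Nat.lt_or_ge i (vals.length - 1) with h | h
          · exact le_of_lt (hmono i _ h (by omega))
          · have : i = vals.length - 1 := by omega
            subst this; exact le_refl _
        have e1 : |t - vals.getD i 0| = t - vals.getD i 0 := abs_of_nonneg (by omega)
        have e2 : |t - vals.getD (vals.length - 1) 0| = t - vals.getD (vals.length - 1) 0 :=
          abs_of_nonneg (by omega)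
        rw [e1, e2]; omega
      · intro i hi htie hne
        exfalso
        have hwi : vals.getD i 0 < t := hlow i (by omega)
        have hwq : vals.getD (vals.length - 1) 0 < t := hlow _ (by omega)
        have e1 : |t - vals.getD i 0| = t - vals.getD i 0 := abs_of_nonneg (by omega)
        have e2 : |t - vals.getD (vals.length - 1) 0| = t - vals.getD (vals.length - 1) 0 :=
          abs_of_nonneg (by omega)
        rw [e1, e2] at htie
        exact hne (by omega)
    · rw [if_neg hplen]
      by_cases hp0 : p = 0
      · rw [if_pos hp0]
        refine ⟨0, by omega, rfl, ?_, ?_⟩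
        · intro i hi
          have hwi : t ≤ vals.getD i 0 := hhigh i (by omega) hi
          have hwq : t ≤ vals.getD 0 0 := hhigh 0 (by omega) (by omega)
          have hle : vals.getD 0 0 ≤ vals.getD i 0 := by
            rcases Nat.lt_or_ge 0 i with h | h
            · exact le_of_lt (hmono 0 i h hi)
            · have : i = 0 := by omega
              subst this; exact le_refl _
          have e1 : |t - vals.getD i 0| = vals.getD i 0 - t := by
            rw [abs_sub_comm]; exact abs_of_nonneg (by omega)
          have e2 : |t - vals.getD 0 0| = vals.getD 0 0 - t := by
            rw [abs_sub_comm]; exact abs_of_nonneg (by omega)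
          rw [e1, e2]; omega
        · intro i hi htie hne
          exfalso
          have hwi : t ≤ vals.getD i 0 := hhigh i (by omega) hi
          have hwq : t ≤ vals.getD 0 0 := hhigh 0 (by omega) (by omega)
          have e1 : |t - vals.getD i 0| = vals.getD i 0 - t := by
            rw [abs_sub_comm]; exact abs_of_nonneg (by omega)
          have e2 : |t - vals.getD 0 0| = vals.getD 0 0 - t := by
            rw [abs_sub_comm]; exact abs_of_nonneg (by omega)
          rw [e1, e2] at htie
          exact hne (by omega)
      · -- middle: 0 < p < length
        rw [if_neg hp0]
        have hpL : p < vals.length := by omega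
        have hp1 : p - 1 < vals.length := by omega
        have ha : vals.getD (p - 1) 0 < t := hlow (p - 1) (by omega)
        have hb : t ≤ vals.getD p 0 := hhigh p (le_refl _) hpL
        have hab : vals.getD (p - 1) 0 < vals.getD p 0 := hmono (p - 1) p (by omega) hpL
        have ea : |t - vals.getD (p - 1) 0| = t - vals.getD (p - 1) 0 := abs_of_nonneg (by omega)
        have eb : |t - vals.getD p 0| = vals.getD p 0 - t := by
          rw [abs_sub_comm]; exact abs_of_nonneg (by omega)
        have hbelow : ∀ i : Nat, i < vals.length → i < p →
            |t - vals.getD i 0| = t - vals.getD i 0 ∧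
            t - vals.getD (p - 1) 0 ≤ t - vals.getD i 0 ∧
            (vals.getD i 0 ≠ vals.getD (p - 1) 0 → t - vals.getD (p - 1) 0 < t - vals.getD i 0) := by
          intro i hi hip
          have hwi : vals.getD i 0 < t := hlow i hip
          refine ⟨abs_of_nonneg (by omega), ?_, ?_⟩
          · rcases Nat.lt_or_ge i (p - 1) with h | h
            · have := hmono i (p - 1) h hp1; omega
            · have : i = p - 1 := by omega
              subst this; omega
          · intro hne
            rcases Nat.lt_or_ge i (p - 1) with h | h
            · have := hmono i (p - 1) h hp1; omega
            · exfalso; have : i = p - 1 := by omega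
              subst this; exact hne rfl
        have habove : ∀ i : Nat, i < vals.length → p ≤ i →
            |t - vals.getD i 0| = vals.getD i 0 - t ∧
            vals.getD p 0 - t ≤ vals.getD i 0 - t ∧
            (vals.getD i 0 ≠ vals.getD p 0 → vals.getD p 0 - t < vals.getD i 0 - t) := by
          intro i hi hip
          have hwi : t ≤ vals.getD i 0 := hhigh i hip hi
          refine ⟨by rw [abs_sub_comm]; exact abs_of_nonneg (by omega), ?_, ?_⟩
          · rcases Nat.lt_or_ge p i with h | h
            · have := hmono p i h hi; omega
            · have : i = p := by omega
              subst this; omega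
          · intro hne
            rcases Nat.lt_or_ge p i with h | h
            · have := hmono p i h hi; omega
            · exfalso; have : i = p := by omega
              subst this; exact hne rfl
        by_cases hda : t - vals.getD (p - 1) 0 < vals.getD p 0 - t
        · rw [if_pos hda]
          refine ⟨p - 1, hp1, rfl, ?_, ?_⟩
          · intro i hi
            rw [ea]
            rcases Nat.lt_or_ge i p with h | h
            · have hb' := hbelow i hi h; rw [hb'.1]; exact hb'.2.1
            · have ha' := habove i hi h; rw [ha'.1]; omega
          · intro i hi htie hne
            exfalso
            rw [ea] at htie
            rcases Nat.lt_or_ge i p with h | h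
            · have hb' := hbelow i hi h
              rw [hb'.1] at htie
              have := hb'.2.2 hne
              omega
            · have ha' := habove i hi h
              rw [ha'.1] at htie
              omega
        · rw [if_neg hda]
          by_cases hdb : vals.getD p 0 - t < t - vals.getD (p - 1) 0
          · rw [if_pos hdb]
            refine ⟨p, hpL, rfl, ?_, ?_⟩
            · intro i hi
              rw [eb]
              rcases Nat.lt_or_ge i p with h | h
              · have hb' := hbelow i hi h; rw [hb'.1]; omega
              · have ha' := habove i hi h; rw [ha'.1]; exact ha'.2.1
            · intro i hi htie hne
              exfalso
              rw [eb] at htie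
              rcases Nat.lt_or_ge i p with h | h
              · have hb' := hbelow i hi h
                rw [hb'.1] at htie
                have := hb'.2.1
                omega
              · have ha' := habove i hi h
                rw [ha'.1] at htie
                have := ha'.2.2 hne
                omega
          · -- tie: t - a = b - t
            have htieab : t - vals.getD (p - 1) 0 = vals.getD p 0 - t := by omega
            rw [if_neg hdb]
            -- the two tied values have distinct first indices
            obtain ⟨na, hidxa, hIa, hna, hva, _⟩ :=
              pvIdx_of_mem jday2 (vals.getD (p - 1) 0) (hval_mem _ hp1)
            obtain ⟨nb, hidxb, hIb, hnb, hvb, _⟩ :=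
              pvIdx_of_mem jday2 (vals.getD p 0) (hval_mem _ hpL)
            have hnane : na ≠ nb := by
              intro hEq
              rw [hEq] at hva
              rw [hva] at hvb
              omega
            by_cases hI : (pvFirstIdx jday2).getD (vals.getD (p - 1) 0) 0 <
                (pvFirstIdx jday2).getD (vals.getD p 0) 0
            · rw [if_pos hI]
              refine ⟨p - 1, hp1, rfl, ?_, ?_⟩
              · intro i hi
                rw [ea]
                rcases Nat.lt_or_ge i p with h | h
                · have hb' := hbelow i hi h; rw [hb'.1]; exact hb'.2.1
                · have ha' := habove i hi h; rw [ha'.1]; omega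
              · intro i hi htie hne
                rw [ea] at htie
                rcases Nat.lt_or_ge i p with h | h
                · exfalso
                  have hb' := hbelow i hi h
                  rw [hb'.1] at htie
                  have := hb'.2.2 hne
                  omega
                · have ha' := habove i hi h
                  rw [ha'.1] at htie
                  by_cases hib : vals.getD i 0 = vals.getD p 0
                  · rw [hib]; exact hI
                  · exfalso
                    have := ha'.2.2 hib
                    omega
            · rw [if_neg hI]
              refine ⟨p, hpL, rfl, ?_, ?_⟩
              · intro i hi
                rw [eb]
                rcases Nat.lt_or_ge i p with h | h
                · have hb' := hbelow i hi h; rw [hb'.1]; omega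
                · have ha' := habove i hi h; rw [ha'.1]; exact ha'.2.1
              · intro i hi htie hne
                rw [eb] at htie
                rcases Nat.lt_or_ge i p with h | h
                · have hb' := hbelow i hi h
                  rw [hb'.1] at htie
                  by_cases hia : vals.getD i 0 = vals.getD (p - 1) 0
                  · rw [hia]
                    rw [hIa, hIb] at hI ⊢
                    have : nb < na := by
                      rcases Nat.lt_or_ge nb na with h' | h'
                      · exact h'
                      · exfalso
                        have h1 : (na : Int) < (nb : Int) → False := fun hc => hI hc
                        have : na = nb := by
                          rcases Nat.lt_or_ge na nb with h'' | h''
                          · exact absurd (by exact_mod_cast h'' : (na : Int) < nb) h1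
                          · omega
                        exact hnane this
                    exact_mod_cast this
                  · exfalso
                    have := hb'.2.2 hia
                    omega
                · exfalso
                  have ha' := habove i hi h
                  rw [ha'.1] at htie
                  have := ha'.2.2 hne
                  omega
  -- from the vals-level facts to the jday2-level first-minimum
  obtain ⟨q, hq, hvq, hP2, hP3⟩ := hmain
  have hvmem : pvVhat jday2 t ∈ jday2 := by rw [hvq]; exact hval_mem q hq
  obtain ⟨n, hidx, hIeq, hn, hvn, hfirst⟩ := pvIdx_of_mem jday2 (pvVhat jday2 t) hvmem
  -- membership of any jday2 element in vals, with an index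
  have hj2vals : ∀ i : Nat, i < jday2.length → ∃ m : Nat, m < vals.length ∧
      vals.getD m 0 = jday2.getD i 0 := by
    intro i hi
    have : jday2.getD i 0 ∈ vals := (mem_pvVals jday2 _).mpr (pvGetD_mem jday2 i 0 hi)
    obtain ⟨m, hm, hmv⟩ := List.mem_iff_getElem.mp this
    exact ⟨m, hm, by rw [List.getD_eq_getElem _ 0 hm]; exact hmv⟩
  have hfmn : pvIsFirstMin t jday2 n := by
    refine ⟨hn, ?_⟩
    intro i hi
    obtain ⟨m, hm, hmv⟩ := hj2vals i hi
    have hle : |t - jday2.getD n 0| ≤ |t - jday2.getD i 0| := by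
      rw [hvn, hvq, ← hmv]
      exact hP2 m hm
    refine ⟨hle, ?_⟩
    intro hin
    rcases lt_or_eq_of_le hle with h | h
    · exact h
    · exfalso
      -- equal distance: show jday2[i] cannot occur before n
      by_cases hsame : jday2.getD i 0 = pvVhat jday2 t
      · exact hfirst i hin hsame
      · have htie : |t - vals.getD m 0| = |t - vals.getD q 0| := by
          rw [hmv, ← hvq, ← hvn, h]
        have hP3i := hP3 m hm htie (by rw [hmv, ← hvq]; exact hsame)
        -- (pvFirstIdx).getD (pvVhat) = n < first index of jday2[i] ≤ i < n, contradiction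
        obtain ⟨ni, hidxi, hIi, hni, hvni, _⟩ :=
          pvIdx_of_mem jday2 (jday2.getD i 0) (pvGetD_mem jday2 i 0 hi)
        rw [← hvq, hIeq] at hP3i
        rw [hmv, hIi] at hP3i
        have hle_i : ni ≤ i := pvIdx_le hidxi hi rfl
        have : n < ni := by exact_mod_cast hP3i
        omega
  have : n = k := pvIsFirstMin_unique hfmn hfmk
  rw [hIeq, this]

-- ---- outer loops ----

-- the value A's inner scan leaves in corresponding_data2_val, when it updates at all
def pvAval (jday2 data2 : List Int) (t : Int) : Option Int :=
  match pvSel t jday2 1000000000 with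
  | none => none
  | some k => PySem.List.pyGet? data2 (k : Int)

theorem pvFresh_sel {jday2 : List Int} {t : Int}
    (h : ∃ y ∈ jday2, |t - y| < 1000000000) :
    ∃ k : Nat, pvSel t jday2 1000000000 = some k := by
  cases hsel : pvSel t jday2 1000000000 with
  | none =>
    obtain ⟨y, hy, hlt⟩ := h
    have := (pvSel_eq_none_iff t jday2 1000000000).mp hsel y hy
    omega
  | some k => exact ⟨k, rfl⟩

def pvStepA (jday2 data2 : List Int) (jd1_offset : Int)
    (acc : List Int × Option Int) (x : Int) : List Int × Option Int :=
  let inner :=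
    (PySem.List.enumerate jday2 0).foldl
      (fun (st : Int × Option Int) jv =>
        if |x + jd1_offset - jv.2| < st.1 then
          (|x + jd1_offset - jv.2|, PySem.List.pyGet? data2 jv.1)
        else st)
      ((1000000000 : Int), acc.2)
  (acc.1 ++ [inner.2.getD 0], inner.2)

theorem pvStepA_eq (jday2 data2 : List Int) (jd1_offset : Int)
    (acc : List Int × Option Int) (x : Int) :
    pvStepA jday2 data2 jd1_offset acc x
    = (acc.1 ++ [(match pvSel (x + jd1_offset) jday2 1000000000 with
                  | none => acc.2
                  | some k => PySem.List.pyGet? data2 ((0 : Int) + (k : Int))).getD 0],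
       match pvSel (x + jd1_offset) jday2 1000000000 with
       | none => acc.2
       | some k => PySem.List.pyGet? data2 ((0 : Int) + (k : Int))) := by
  show ((acc.1 ++ [((PySem.List.enumerate jday2 0).foldl
      (fun (st : Int × Option Int) jv =>
        if |x + jd1_offset - jv.2| < st.1 then
          (|x + jd1_offset - jv.2|, PySem.List.pyGet? data2 jv.1)
        else st)
      ((1000000000 : Int), acc.2)).2.getD 0],
    ((PySem.List.enumerate jday2 0).foldl
      (fun (st : Int × Option Int) jv =>
        if |x + jd1_offset - jv.2| < st.1 then
          (|x + jd1_offset - jv.2|, PySem.List.pyGet? data2 jv.1)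
        else st)
      ((1000000000 : Int), acc.2)).2) : List Int × Option Int) = _
  rw [pvFoldA_eq (x + jd1_offset) data2 jday2 0 1000000000 acc.2]

theorem pvA_fold_fresh (jday2 data2 : List Int) (jd1_offset : Int) :
    ∀ (l : List Int) (acc : List Int) (c : Option Int),
    (∀ x ∈ l, ∃ y ∈ jday2, |x + jd1_offset - y| < 1000000000) →
    (l.foldl (pvStepA jday2 data2 jd1_offset) (acc, c)).1
    = acc ++ l.map (fun x => (pvAval jday2 data2 (x + jd1_offset)).getD 0) := by
  intro l
  induction l with
  | nil => intro acc c _; simp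
  | cons x r ih =>
    intro acc c hfresh
    obtain ⟨k, hsel⟩ := pvFresh_sel (hfresh x (by simp))
    simp only [List.foldl_cons, pvStepA_eq, hsel]
    rw [ih _ _ (fun z hz => hfresh z (List.mem_cons_of_mem _ hz))]
    simp [pvAval, hsel]

theorem pvA_unfold (jday1 jday2 data2 : List Int) (jd1_offset : Int) :
    merge_data_nearest_jday jday1 jday2 data2 jd1_offset
    = (jday1.foldl (pvStepA jday2 data2 jd1_offset)
        (([] : List Int), (none : Option Int))).1 := rfl

-- ===== VERDICT (by name: the statement is the Claim_ definition above) =====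
theorem merge_data_nearest_jday_spec : Claim_equal_merge_data_nearest_jday := by
  intro jday1 jday2 data2 jd1_offset _hdom hpre
  obtain ⟨_hlen, hfresh⟩ := hpre
  rw [Spec_merge_data_nearest_jday, pvA_unfold,
    pvA_fold_fresh jday2 data2 jd1_offset jday1 [] none hfresh,
    pvAlt_eq_map]
  simp only [List.nil_append]
  apply List.map_congr_left
  intro x hx
  obtain ⟨k, hsel⟩ := pvFresh_sel (hfresh x hx)
  rw [pvVhat_firstIdx_eq jday2 (x + jd1_offset) k hsel]
  simp [pvAval, hsel]
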